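-- pv_equiv track=rewrite | github.com/CptTemplar1/Kryptografia_lab | lab5/Piotrka/zad1.py | generate_keystream
-- ===== SOURCE A (Python) =====
-- TAPS = [0, 1, 3, 5, 16]
--
-- INITIAL_STATE = [0, 1, 0, 1, 0, 1, 1, 0, 1, 1, 0, 1, 0, 1, 1, 0, 1]
--
-- def generate_keystream(length):
--     """Generuje keystream długości `length` bitów na bazie LFSR."""
--     state = INITIAL_STATE.copy()
--     keystream = []
--     for _ in range(length):
--         # Wyjście: ostatni bit rejestru
--         keystream.append(state[-1])
--         # Oblicz nowy bit jako XOR wybranych tapów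
--         new_bit = 0
--         for t in TAPS:
--             new_bit ^= state[t]
--         # Przesuń rejestr w prawo i wstaw nowy bit na początku
--         state = [new_bit] + state[:-1]
--     return keystream
-- ===== SOURCE B (Python) =====
-- INITIAL_STATE = [0, 1, 0, 1, 0, 1, 1, 0, 1, 1, 0, 1, 0, 1, 1, 0, 1]
--
-- def generate_keystream(length):
--     """Generuje keystream dlugosci `length` bitow: zamiast symulowac rejestr,
--     rozwija sam ciag wyjsciowy rekurencja liniowa
--     o[n] = o[n-1] ^ o[n-2] ^ o[n-4] ^ o[n-6] ^ o[n-17],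
--     z 17 pierwszymi wyjsciami rownymi odwroconemu stanowi poczatkowemu."""
--     if length <= 0:
--         return []
--     out = INITIAL_STATE[::-1]
--     for n in range(17, length):
--         out.append(out[n-1] ^ out[n-2] ^ out[n-4] ^ out[n-6] ^ out[n-17])
--     return out[:length]
-- ===== Notes on version B (the rewrite author's own statement) =====
-- stated objective: alternative
-- what changed: B does not simulate the shift register at all: it seeds the first 17 output bits with the reversed initial state and extends the keystream itself by the equivalent output recurrence o[n] = o[n-1]^o[n-2]^o[n-4]^o[n-6]^o[n-17], then truncates; A instead maintains the register list, copying it and scanning the taps each step (B avoids the per-step 17-element list copy).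
import Mathlib
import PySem

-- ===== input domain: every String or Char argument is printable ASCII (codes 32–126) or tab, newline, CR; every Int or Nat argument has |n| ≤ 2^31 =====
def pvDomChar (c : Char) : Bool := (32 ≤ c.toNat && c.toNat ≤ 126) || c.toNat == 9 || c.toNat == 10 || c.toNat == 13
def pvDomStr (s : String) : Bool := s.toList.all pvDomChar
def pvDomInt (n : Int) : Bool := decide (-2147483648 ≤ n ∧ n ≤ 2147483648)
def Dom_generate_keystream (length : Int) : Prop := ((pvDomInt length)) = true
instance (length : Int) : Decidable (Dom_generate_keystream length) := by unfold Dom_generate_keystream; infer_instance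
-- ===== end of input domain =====

-- B drops the register simulation entirely: it extends the keystream itself by the
-- equivalent output recurrence o[n] = o[n-1]^o[n-2]^o[n-4]^o[n-6]^o[n-17], seeded with
-- the reversed initial state; objective: alternative (same O(length) cost).

-- ===== PORT A =====
def TAPS : List Int := [0, 1, 3, 5, 16]

def INITIAL_STATE : List Int := [0, 1, 0, 1, 0, 1, 1, 0, 1, 1, 0, 1, 0, 1, 1, 0, 1]

-- loop body of A: state[-1] and state[t] are always in range (the register always has 17 bits),
-- so `.getD 0` never supplies its default
def stepA (p : List Int × List Int) (_ : Int) : List Int × List Int :=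
  let keystream := p.2 ++ [(PySem.List.pyGet? p.1 (-1)).getD 0]
  let new_bit := TAPS.foldl (fun nb t => PySem.Int.bxor nb ((PySem.List.pyGet? p.1 t).getD 0)) 0
  (new_bit :: PySem.List.slice p.1 none (some (-1)), keystream)

def generate_keystream (length : Int) : List Int :=
  ((PySem.List.pyRange 0 length 1).foldl stepA (INITIAL_STATE, [])).2

-- ===== PORT B =====
-- loop body of B: out[n-1], out[n-2], out[n-4], out[n-6], out[n-17] are always in range
-- (when index n is processed, out has exactly n ≥ 17 elements), so `pyGetD … 0` is exact
def stepB (out : List Int) (n : Int) : List Int :=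
  out ++ [PySem.Int.bxor (PySem.Int.bxor (PySem.Int.bxor (PySem.Int.bxor
    (PySem.List.pyGetD out (n - 1) 0) (PySem.List.pyGetD out (n - 2) 0))
    (PySem.List.pyGetD out (n - 4) 0)) (PySem.List.pyGetD out (n - 6) 0))
    (PySem.List.pyGetD out (n - 17) 0)]

def generate_keystream_alt (length : Int) : List Int :=
  if length ≤ 0 then []
  else
    -- INITIAL_STATE[::-1] is list reverse (PySem.List.slice?_none_none_neg_one)
    let out := (PySem.List.pyRange 17 length 1).foldl stepB INITIAL_STATE.reverse
    PySem.List.slice out none (some length)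

-- ===== PRECONDITION & SPEC =====
def Spec_generate_keystream (length : Int) (out : List Int) : Prop := out = generate_keystream_alt length
instance (length : Int) (out : List Int) : Decidable (Spec_generate_keystream length out) := by unfold Spec_generate_keystream; infer_instance

-- ===== CLAIM (what is proved, stated in full; the proofs are below) =====
def Claim_equal_generate_keystream : Prop := ∀ (length : Int), Dom_generate_keystream length → Spec_generate_keystream length (generate_keystream length)

-- ===== LEMMAS AND PROOFS =====

-- the common reference: the n-th keystream bit, by the output recurrence
def oseq (n : Nat) : Int :=
  if h : n < 17 then ([1,0,1,1,0,1,0,1,1,0,1,1,0,1,0,1,0] : List Int).getD n 0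
  else PySem.Int.bxor (PySem.Int.bxor (PySem.Int.bxor (PySem.Int.bxor
    (oseq (n - 1)) (oseq (n - 2))) (oseq (n - 4))) (oseq (n - 6))) (oseq (n - 17))
termination_by n
decreasing_by all_goals omega

lemma oseq_base (n : Nat) (h : n < 17) :
    oseq n = ([1,0,1,1,0,1,0,1,1,0,1,1,0,1,0,1,0] : List Int).getD n 0 := by
  rw [oseq]; exact dif_pos h

lemma oseq_step (m : Nat) : oseq (m + 17) =
    PySem.Int.bxor (PySem.Int.bxor (PySem.Int.bxor (PySem.Int.bxor
      (oseq (m + 16)) (oseq (m + 15))) (oseq (m + 13))) (oseq (m + 11))) (oseq m) := by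
  rw [oseq, dif_neg (by omega)]
  simp only [show m + 17 - 1 = m + 16 from by omega, show m + 17 - 2 = m + 15 from by omega,
    show m + 17 - 4 = m + 13 from by omega, show m + 17 - 6 = m + 11 from by omega,
    show m + 17 - 17 = m from by omega]

-- A's register after m steps: state[i] = oseq (m + 16 - i)
def stateAt (m : Nat) : List Int :=
  [oseq (m+16), oseq (m+15), oseq (m+14), oseq (m+13), oseq (m+12), oseq (m+11),
   oseq (m+10), oseq (m+9), oseq (m+8), oseq (m+7), oseq (m+6), oseq (m+5),
   oseq (m+4), oseq (m+3), oseq (m+2), oseq (m+1), oseq m]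

lemma stateAt_zero : stateAt 0 = INITIAL_STATE := by
  simp only [stateAt, INITIAL_STATE, Nat.zero_add]
  simp [oseq_base]

lemma bxor_zero_left (a : Int) : PySem.Int.bxor 0 a = a := by
  rw [PySem.Int.bxor_comm]; exact PySem.Int.bxor_zero a

lemma stepA_eq (m : Nat) (ks : List Int) (x : Int) :
    stepA (stateAt m, ks) x = (stateAt (m+1), ks ++ [oseq m]) := by
  simp only [stepA, stateAt, TAPS, List.foldl_cons, List.foldl_nil,
    PySem.List.pyGet?, PySem.List.pyIdx?]
  norm_num [PySem.List.slice_to_neg_one, List.dropLast, bxor_zero_left, Int.toNat]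
  rw [show m + 1 + 16 = m + 17 by omega, oseq_step]

lemma A_loop (r : List Int) : ∀ (m : Nat) (ks : List Int),
    r.foldl stepA (stateAt m, ks)
      = (stateAt (m + r.length), ks ++ (List.range r.length).map (fun j => oseq (m + j))) := by
  induction r with
  | nil => intro m ks; simp
  | cons x r ih =>
    intro m ks
    rw [List.foldl_cons, stepA_eq, ih]
    refine Prod.ext ?_ ?_
    · simp only [List.length_cons]; congr 1; omega
    · have hf : (fun j => oseq (m + 1 + j)) = (fun j => oseq (m + (j + 1))) :=
        funext fun j => by congr 1; omega
      simp only [List.length_cons, List.range_succ_eq_map, List.map_cons, List.map_map,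
        List.append_assoc, List.singleton_append, hf, Function.comp_def, Nat.add_zero]

lemma seq_get (m k : Nat) (h : k < m) :
    PySem.List.pyGetD ((List.range m).map oseq) ((k : Int)) 0 = oseq k := by
  simp [PySem.List.pyGetD_natCast, List.getD, h]

lemma stepB_eq (m : Nat) (h : 17 ≤ m) :
    stepB ((List.range m).map oseq) (m : Int) = (List.range (m+1)).map oseq := by
  have e : ∀ k : Nat, k ≤ m → ((m : Int) - (k : Int)) = ((m - k : Nat) : Int) := by
    intro k hk; omega
  simp only [stepB]
  rw [show ((m:Int) - 1) = ((m - 1 : Nat) : Int) by omega,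
      show ((m:Int) - 2) = ((m - 2 : Nat) : Int) by omega,
      show ((m:Int) - 4) = ((m - 4 : Nat) : Int) by omega,
      show ((m:Int) - 6) = ((m - 6 : Nat) : Int) by omega,
      show ((m:Int) - 17) = ((m - 17 : Nat) : Int) by omega,
      seq_get m (m-1) (by omega), seq_get m (m-2) (by omega), seq_get m (m-4) (by omega),
      seq_get m (m-6) (by omega), seq_get m (m-17) (by omega)]
  rw [List.range_succ, List.map_append, List.map_singleton]
  congr 1
  rw [show m = (m - 17) + 17 by omega, oseq_step]
  congr 3

lemma B_loop (b : Int) : ∀ (fuel m : Nat), (b - (m : Int)).toNat ≤ fuel → 17 ≤ m →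
    (PySem.List.pyRange (m : Int) b 1).foldl stepB ((List.range m).map oseq)
      = (List.range (max m b.toNat)).map oseq := by
  intro fuel
  induction fuel with
  | zero =>
    intro m hf hm
    rw [PySem.List.pyRange_one_eq_nil (by omega), show max m b.toNat = m from by omega]
    simp only [List.foldl_nil]
  | succ fuel ih =>
    intro m hf hm
    by_cases hb : b ≤ (m : Int)
    · rw [PySem.List.pyRange_one_eq_nil hb, show max m b.toNat = m from by omega]
      simp only [List.foldl_nil]
    · rw [PySem.List.pyRange_one_cons (by omega), List.foldl_cons, stepB_eq m hm]
      have : ((m : Int) + 1) = ((m + 1 : Nat) : Int) := by omega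
      rw [this, ih (m+1) (by omega) (by omega),
        show max (m+1) b.toNat = max m b.toNat from by omega]

lemma init_rev : INITIAL_STATE.reverse = (List.range 17).map oseq := by
  have : ∀ n ∈ List.range 17,
      oseq n = ([1,0,1,1,0,1,0,1,1,0,1,1,0,1,0,1,0] : List Int).getD n 0 := by
    intro n hn
    exact oseq_base n (List.mem_range.mp hn)
  rw [List.map_congr_left this]
  decide

lemma A_closed (length : Int) :
    generate_keystream length = (List.range length.toNat).map oseq := by
  unfold generate_keystream
  rw [← stateAt_zero, A_loop]
  simp [PySem.List.length_pyRange_one]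

-- ===== VERDICT (by name: the statement is the Claim_ definition above) =====
theorem generate_keystream_spec : Claim_equal_generate_keystream := by
  intro length _
  unfold Spec_generate_keystream
  rw [A_closed]
  unfold generate_keystream_alt
  by_cases h : length ≤ 0
  · simp [h, show length.toNat = 0 by omega]
  · simp only [h, if_false]
    rw [init_rev, show (17 : Int) = ((17:Nat) : Int) by rfl,
      B_loop length (length - 17).toNat 17 (by omega) (by omega),
      PySem.List.slice_to _ (by omega), ← List.map_take, List.take_range,
      show min length.toNat (max 17 length.toNat) = length.toNat from by omega]
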